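-- pv_equiv track=rewrite | github.com/Quanbro07/Loko-Project | test_tdtt/test_tdtt/utils.py | get_service_time
-- ===== SOURCE A (Python) =====
-- def get_service_time(tags):
--     if not tags:
--         return 60
--     if any(t in tags for t in ["restaurant", "cafe", "food", "street-food"]):
--         return 60
--     if any(t in tags for t in ["museum", "temple", "pagoda", "cathedral"]):
--         return 90
--     if any(t in tags for t in ["shopping", "market"]):
--         return 75
--     if any(t in tags for t in ["amusement", "park", "zoo"]):
--         return 120
--     if any(t in tags for t in ["trekking", "mountain", "waterfall", "nature"]):
--         return 150
--     return 60
-- ===== SOURCE B (Python) =====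
-- _SERVICE = {
--     "restaurant": (0, 60), "cafe": (0, 60), "food": (0, 60), "street-food": (0, 60),
--     "museum": (1, 90), "temple": (1, 90), "pagoda": (1, 90), "cathedral": (1, 90),
--     "shopping": (2, 75), "market": (2, 75),
--     "amusement": (3, 120), "park": (3, 120), "zoo": (3, 120),
--     "trekking": (4, 150), "mountain": (4, 150), "waterfall": (4, 150), "nature": (4, 150),
-- }
--
-- def get_service_time(tags):
--     best = None
--     for tag in tags:
--         entry = _SERVICE.get(tag)
--         if entry is not None and (best is None or entry[0] < best[0]):
--             best = entry
--     return 60 if best is None else best[1]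
-- ===== Notes on version B (the rewrite author's own statement) =====
-- stated objective: alternative
-- what changed: A scans each hard-coded category list in priority order testing membership in tags; B builds one keyword -> (priority, minutes) dict and makes a single pass over the tags keeping the entry with the smallest priority seen, returning its minutes (60 if no tag matched).
import Mathlib
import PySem

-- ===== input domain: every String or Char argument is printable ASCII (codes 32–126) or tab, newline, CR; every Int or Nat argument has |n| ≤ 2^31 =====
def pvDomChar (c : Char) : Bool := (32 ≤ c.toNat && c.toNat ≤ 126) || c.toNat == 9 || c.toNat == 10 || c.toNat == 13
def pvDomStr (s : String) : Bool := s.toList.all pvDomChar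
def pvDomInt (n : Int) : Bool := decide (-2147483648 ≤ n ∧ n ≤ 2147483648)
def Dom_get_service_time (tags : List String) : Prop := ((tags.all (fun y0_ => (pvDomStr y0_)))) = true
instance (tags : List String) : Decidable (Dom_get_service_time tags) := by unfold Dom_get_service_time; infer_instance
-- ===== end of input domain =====

-- B replaces A's sequence of per-category membership scans by a single pass over the tags with a
-- keyword → (priority, minutes) table and a running minimum-priority entry (objective: alternative).

-- ===== PORT A =====
def get_service_time (tags : List String) : Int :=
  if tags = [] then 60
  else if (["restaurant", "cafe", "food", "street-food"].any (fun t => tags.contains t)) then 60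
  else if (["museum", "temple", "pagoda", "cathedral"].any (fun t => tags.contains t)) then 90
  else if (["shopping", "market"].any (fun t => tags.contains t)) then 75
  else if (["amusement", "park", "zoo"].any (fun t => tags.contains t)) then 120
  else if (["trekking", "mountain", "waterfall", "nature"].any (fun t => tags.contains t)) then 150
  else 60

-- ===== PORT B =====
def pvServiceTable : PySem.Dict String (Int × Int) :=
  PySem.Dict.ofList
    [("restaurant", (0, 60)), ("cafe", (0, 60)), ("food", (0, 60)), ("street-food", (0, 60)),
     ("museum", (1, 90)), ("temple", (1, 90)), ("pagoda", (1, 90)), ("cathedral", (1, 90)),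
     ("shopping", (2, 75)), ("market", (2, 75)),
     ("amusement", (3, 120)), ("park", (3, 120)), ("zoo", (3, 120)),
     ("trekking", (4, 150)), ("mountain", (4, 150)), ("waterfall", (4, 150)), ("nature", (4, 150))]

-- the body of B's for-loop: keep the lowest-priority table entry seen so far
def pvStep (best : Option (Int × Int)) (tag : String) : Option (Int × Int) :=
  match pvServiceTable.get? tag with
  | none => best
  | some entry =>
    match best with
    | none => some entry
    | some b => if entry.1 < b.1 then some entry else best

def get_service_time_alt (tags : List String) : Int :=
  match tags.foldl pvStep none with
  | none => 60
  | some b => b.2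

-- ===== PRECONDITION & SPEC =====
def Spec_get_service_time (tags : List String) (out : Int) : Prop := out = get_service_time_alt tags
instance (tags : List String) (out : Int) : Decidable (Spec_get_service_time tags out) := by unfold Spec_get_service_time; infer_instance

-- ===== CLAIM (what is proved, stated in full; the proofs are below) =====
def Claim_equal_get_service_time : Prop := ∀ (tags : List String), Dom_get_service_time tags → Spec_get_service_time tags (get_service_time tags)

-- ===== LEMMAS AND PROOFS =====

-- left-biased "keep the smaller priority" combination; pvStep a t = pvCmb a (lookup t)
def pvCmb (a b : Option (Int × Int)) : Option (Int × Int) :=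
  match b with
  | none => a
  | some e =>
    match a with
    | none => some e
    | some x => if e.1 < x.1 then some e else a

lemma pvStep_eq (a : Option (Int × Int)) (t : String) :
    pvStep a t = pvCmb a (pvServiceTable.get? t) := by
  unfold pvStep pvCmb
  cases pvServiceTable.get? t <;> cases a <;> rfl

lemma pvCmb_none_right (a : Option (Int × Int)) : pvCmb a none = a := rfl

lemma pvCmb_none_left (b : Option (Int × Int)) : pvCmb none b = b := by
  cases b <;> rfl

lemma pvCmb_assoc (a b c : Option (Int × Int)) :
    pvCmb (pvCmb a b) c = pvCmb a (pvCmb b c) := by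
  rcases a with _ | x <;> rcases b with _ | y <;> rcases c with _ | z <;>
    try rfl
  · simp only [pvCmb]; split_ifs <;> rfl
  · by_cases hyx : y.1 < x.1 <;> by_cases hzy : z.1 < y.1 <;> by_cases hzx : z.1 < x.1 <;>
      simp only [pvCmb, hyx, hzy, hzx, if_true, if_false] <;>
      first | rfl | omega

lemma pvFold_acc (tags : List String) :
    ∀ acc, tags.foldl pvStep acc = pvCmb acc (tags.foldl pvStep none) := by
  induction tags with
  | nil => intro acc; simp [pvCmb_none_right]
  | cons t ts ih =>
    intro acc
    simp only [List.foldl_cons]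
    rw [ih (pvStep acc t), ih (pvStep none t), pvStep_eq, pvStep_eq,
        pvCmb_none_left, pvCmb_assoc]

-- the value of B's loop, characterised by which category has a member in tags
def pvBest (tags : List String) : Option (Int × Int) :=
  if tags.any (fun s => (["restaurant", "cafe", "food", "street-food"] : List String).contains s) then some (0, 60)
  else if tags.any (fun s => (["museum", "temple", "pagoda", "cathedral"] : List String).contains s) then some (1, 90)
  else if tags.any (fun s => (["shopping", "market"] : List String).contains s) then some (2, 75)
  else if tags.any (fun s => (["amusement", "park", "zoo"] : List String).contains s) then some (3, 120)
  else if tags.any (fun s => (["trekking", "mountain", "waterfall", "nature"] : List String).contains s) then some (4, 150)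
  else none

lemma pvCmb_prio0 (ts : List String) :
    pvCmb (some (0, 60)) (pvBest ts) =
      some (0, 60) := by
  unfold pvBest
  split_ifs <;> norm_num [pvCmb]

lemma pvCmb_prio1 (ts : List String) :
    pvCmb (some (1, 90)) (pvBest ts) =
      if ts.any (fun s => (["restaurant", "cafe", "food", "street-food"] : List String).contains s) then some (0, 60)
      else some (1, 90) := by
  unfold pvBest
  split_ifs <;> norm_num [pvCmb]

lemma pvCmb_prio2 (ts : List String) :
    pvCmb (some (2, 75)) (pvBest ts) =
      if ts.any (fun s => (["restaurant", "cafe", "food", "street-food"] : List String).contains s) then some (0, 60)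
      else if ts.any (fun s => (["museum", "temple", "pagoda", "cathedral"] : List String).contains s) then some (1, 90)
      else some (2, 75) := by
  unfold pvBest
  split_ifs <;> norm_num [pvCmb]

lemma pvCmb_prio3 (ts : List String) :
    pvCmb (some (3, 120)) (pvBest ts) =
      if ts.any (fun s => (["restaurant", "cafe", "food", "street-food"] : List String).contains s) then some (0, 60)
      else if ts.any (fun s => (["museum", "temple", "pagoda", "cathedral"] : List String).contains s) then some (1, 90)
      else if ts.any (fun s => (["shopping", "market"] : List String).contains s) then some (2, 75)
      else some (3, 120) := by
  unfold pvBest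
  split_ifs <;> norm_num [pvCmb]

lemma pvCmb_prio4 (ts : List String) :
    pvCmb (some (4, 150)) (pvBest ts) =
      if ts.any (fun s => (["restaurant", "cafe", "food", "street-food"] : List String).contains s) then some (0, 60)
      else if ts.any (fun s => (["museum", "temple", "pagoda", "cathedral"] : List String).contains s) then some (1, 90)
      else if ts.any (fun s => (["shopping", "market"] : List String).contains s) then some (2, 75)
      else if ts.any (fun s => (["amusement", "park", "zoo"] : List String).contains s) then some (3, 120)
      else some (4, 150) := by
  unfold pvBest
  split_ifs <;> norm_num [pvCmb]

lemma pvBest_char (tags : List String) : tags.foldl pvStep none = pvBest tags := by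
  induction tags with
  | nil => rfl
  | cons t ts ih =>
    rw [List.foldl_cons, pvFold_acc, ih, pvStep_eq, pvCmb_none_left]
    by_cases h0 : t = "restaurant"
    · subst h0
      rw [show pvServiceTable.get? "restaurant" = some (0, 60) from rfl, pvCmb_prio0]
      unfold pvBest
      simp [List.any_cons]
    by_cases h1 : t = "cafe"
    · subst h1
      rw [show pvServiceTable.get? "cafe" = some (0, 60) from rfl, pvCmb_prio0]
      unfold pvBest
      simp [List.any_cons]
    by_cases h2 : t = "food"
    · subst h2
      rw [show pvServiceTable.get? "food" = some (0, 60) from rfl, pvCmb_prio0]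
      unfold pvBest
      simp [List.any_cons]
    by_cases h3 : t = "street-food"
    · subst h3
      rw [show pvServiceTable.get? "street-food" = some (0, 60) from rfl, pvCmb_prio0]
      unfold pvBest
      simp [List.any_cons]
    by_cases h4 : t = "museum"
    · subst h4
      rw [show pvServiceTable.get? "museum" = some (1, 90) from rfl, pvCmb_prio1]
      unfold pvBest
      simp [List.any_cons]
    by_cases h5 : t = "temple"
    · subst h5
      rw [show pvServiceTable.get? "temple" = some (1, 90) from rfl, pvCmb_prio1]
      unfold pvBest
      simp [List.any_cons]
    by_cases h6 : t = "pagoda"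
    · subst h6
      rw [show pvServiceTable.get? "pagoda" = some (1, 90) from rfl, pvCmb_prio1]
      unfold pvBest
      simp [List.any_cons]
    by_cases h7 : t = "cathedral"
    · subst h7
      rw [show pvServiceTable.get? "cathedral" = some (1, 90) from rfl, pvCmb_prio1]
      unfold pvBest
      simp [List.any_cons]
    by_cases h8 : t = "shopping"
    · subst h8
      rw [show pvServiceTable.get? "shopping" = some (2, 75) from rfl, pvCmb_prio2]
      unfold pvBest
      simp [List.any_cons]
    by_cases h9 : t = "market"
    · subst h9
      rw [show pvServiceTable.get? "market" = some (2, 75) from rfl, pvCmb_prio2]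
      unfold pvBest
      simp [List.any_cons]
    by_cases h10 : t = "amusement"
    · subst h10
      rw [show pvServiceTable.get? "amusement" = some (3, 120) from rfl, pvCmb_prio3]
      unfold pvBest
      simp [List.any_cons]
    by_cases h11 : t = "park"
    · subst h11
      rw [show pvServiceTable.get? "park" = some (3, 120) from rfl, pvCmb_prio3]
      unfold pvBest
      simp [List.any_cons]
    by_cases h12 : t = "zoo"
    · subst h12
      rw [show pvServiceTable.get? "zoo" = some (3, 120) from rfl, pvCmb_prio3]
      unfold pvBest
      simp [List.any_cons]
    by_cases h13 : t = "trekking"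
    · subst h13
      rw [show pvServiceTable.get? "trekking" = some (4, 150) from rfl, pvCmb_prio4]
      unfold pvBest
      simp [List.any_cons]
    by_cases h14 : t = "mountain"
    · subst h14
      rw [show pvServiceTable.get? "mountain" = some (4, 150) from rfl, pvCmb_prio4]
      unfold pvBest
      simp [List.any_cons]
    by_cases h15 : t = "waterfall"
    · subst h15
      rw [show pvServiceTable.get? "waterfall" = some (4, 150) from rfl, pvCmb_prio4]
      unfold pvBest
      simp [List.any_cons]
    by_cases h16 : t = "nature"
    · subst h16
      rw [show pvServiceTable.get? "nature" = some (4, 150) from rfl, pvCmb_prio4]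
      unfold pvBest
      simp [List.any_cons]
    have hn : pvServiceTable.get? t = none := by
      rw [show pvServiceTable = PySem.Dict.mk
        [("restaurant", ((0 : Int), (60 : Int))), ("cafe", (0, 60)), ("food", (0, 60)), ("street-food", (0, 60)),
         ("museum", (1, 90)), ("temple", (1, 90)), ("pagoda", (1, 90)), ("cathedral", (1, 90)),
         ("shopping", (2, 75)), ("market", (2, 75)),
         ("amusement", (3, 120)), ("park", (3, 120)), ("zoo", (3, 120)),
         ("trekking", (4, 150)), ("mountain", (4, 150)), ("waterfall", (4, 150)), ("nature", (4, 150))] from rfl]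
      simp only [PySem.Dict.get?_mk_cons, beq_iff_eq]
      simp [Ne.symm h0, Ne.symm h1, Ne.symm h2, Ne.symm h3, Ne.symm h4, Ne.symm h5, Ne.symm h6, Ne.symm h7, Ne.symm h8, Ne.symm h9, Ne.symm h10, Ne.symm h11, Ne.symm h12, Ne.symm h13, Ne.symm h14, Ne.symm h15, Ne.symm h16, PySem.Dict.get?]
    rw [hn, pvCmb_none_left]
    unfold pvBest
    simp [List.any_cons, h0, h1, h2, h3, h4, h5, h6, h7, h8, h9, h10, h11, h12, h13, h14, h15, h16]

lemma pvAny_comm (kws tags : List String) :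
    kws.any (fun t => tags.contains t) = tags.any (fun s => kws.contains s) := by
  rw [Bool.eq_iff_iff]
  simp only [List.any_eq_true, List.contains_iff_mem]
  tauto

-- ===== VERDICT (by name: the statement is the Claim_ definition above) =====
theorem get_service_time_spec : Claim_equal_get_service_time := by
  intro tags _
  show get_service_time tags = get_service_time_alt tags
  unfold get_service_time get_service_time_alt
  rw [pvBest_char]
  by_cases hE : tags = []
  · subst hE; rfl
  · simp only [hE, if_false]
    have e1 := pvAny_comm ["restaurant", "cafe", "food", "street-food"] tags
    have e2 := pvAny_comm ["museum", "temple", "pagoda", "cathedral"] tags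
    have e3 := pvAny_comm ["shopping", "market"] tags
    have e4 := pvAny_comm ["amusement", "park", "zoo"] tags
    have e5 := pvAny_comm ["trekking", "mountain", "waterfall", "nature"] tags
    rw [e1, e2, e3, e4, e5]
    unfold pvBest
    split_ifs <;> rfl
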